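-- pv_equiv track=rewrite | github.com/vlkuz-dev/netbox-yandexcloud-sync | src/netbox_sync/sync/vms.py | detect_platform_slug
-- ===== SOURCE A (Python) =====
-- DEFAULT_PLATFORM_SLUG = "linux"
--
-- def detect_platform_slug(os_name: str) -> str:
--     """Detect platform slug from OS name string. Returns a slug suitable for NetBox platform lookup."""
--     if not os_name:
--         return DEFAULT_PLATFORM_SLUG
--
--     os_name_lower = os_name.lower()
--
--     if "windows" in os_name_lower:
--         if "2019" in os_name_lower:
--             return "windows-2019"
--         elif "2022" in os_name_lower:
--             return "windows-2022"
--         elif "2025" in os_name_lower: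
--             return "windows-2025"
--         else:
--             return "windows"
--     elif "ubuntu" in os_name_lower:
--         if "22.04" in os_name_lower or "22-04" in os_name_lower or "jammy" in os_name_lower:
--             return "ubuntu-22-04"
--         elif "24.04" in os_name_lower or "24-04" in os_name_lower or "noble" in os_name_lower:
--             return "ubuntu-24-04"
--         else:
--             return "ubuntu-22-04"
--     elif "debian" in os_name_lower:
--         if "11" in os_name_lower or "bullseye" in os_name_lower:
--             return "debian-11"
--         else:
--             return "debian-11"
--     elif "centos" in os_name_lower:
--         if "7" in os_name_lower:
--             return "centos-7"
--         else:
--             return DEFAULT_PLATFORM_SLUG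
--     elif "alma" in os_name_lower or "almalinux" in os_name_lower:
--         if "9" in os_name_lower:
--             return "almalinux-9"
--         else:
--             return DEFAULT_PLATFORM_SLUG
--     elif "oracle" in os_name_lower:
--         if "9" in os_name_lower:
--             return "oracle-linux-9"
--         else:
--             return DEFAULT_PLATFORM_SLUG
--     elif any(k in os_name_lower for k in ("rocky", "rhel", "red hat", "fedora")):
--         return DEFAULT_PLATFORM_SLUG
--     elif "linux" in os_name_lower:
--         return DEFAULT_PLATFORM_SLUG
--
--     return DEFAULT_PLATFORM_SLUG
-- ===== SOURCE B (Python) =====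
-- DEFAULT_PLATFORM_SLUG = "linux"
--
-- # Ordered classification rules: (family_keyword, [(substrings, slug), ...], family_default)
-- PLATFORM_RULES = [
--     ("windows", [(("2019",), "windows-2019"),
--                  (("2022",), "windows-2022"),
--                  (("2025",), "windows-2025")], "windows"),
--     ("ubuntu",  [(("22.04", "22-04", "jammy"), "ubuntu-22-04"),
--                  (("24.04", "24-04", "noble"), "ubuntu-24-04")], "ubuntu-22-04"),
--     ("debian",  [], "debian-11"),
--     ("centos",  [(("7",), "centos-7")], DEFAULT_PLATFORM_SLUG),
--     ("alma",    [(("9",), "almalinux-9")], DEFAULT_PLATFORM_SLUG),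
--     ("oracle",  [(("9",), "oracle-linux-9")], DEFAULT_PLATFORM_SLUG),
-- ]
--
-- def detect_platform_slug(os_name: str) -> str:
--     """Detect platform slug from OS name string. Returns a slug suitable for NetBox platform lookup."""
--     s = os_name.lower()
--     for family, subrules, family_default in PLATFORM_RULES:
--         if family in s:
--             for substrings, slug in subrules:
--                 if any(k in s for k in substrings):
--                     return slug
--             return family_default
--     return DEFAULT_PLATFORM_SLUG
-- ===== Notes on version B (the rewrite author's own statement) =====
-- stated objective: idiomatic
-- what changed: Replaces the hard-coded if/elif cascade by a single loop over an ordered data table of (family keyword, versioned subrules, family default), dropping the redundant empty-string guard, a subsumed family-keyword disjunct and the dead trailing branches that all return the default anyway.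
import Mathlib
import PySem

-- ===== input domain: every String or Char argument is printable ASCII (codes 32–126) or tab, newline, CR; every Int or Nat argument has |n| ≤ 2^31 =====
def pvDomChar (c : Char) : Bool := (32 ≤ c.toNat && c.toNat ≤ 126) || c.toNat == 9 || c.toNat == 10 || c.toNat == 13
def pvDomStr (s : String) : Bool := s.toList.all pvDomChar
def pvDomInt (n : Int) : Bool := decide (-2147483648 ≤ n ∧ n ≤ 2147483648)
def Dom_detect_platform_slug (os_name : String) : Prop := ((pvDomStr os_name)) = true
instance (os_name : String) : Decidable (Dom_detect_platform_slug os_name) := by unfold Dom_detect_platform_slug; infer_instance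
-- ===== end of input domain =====

-- B replaces A's if/elif cascade by one loop over an ordered rule table (idiomatic; same cost).

-- ===== PORT A =====
def detect_platform_slug (os_name : String) : String :=
  if os_name == "" then "linux"
  else
    let s := PySem.Str.lower os_name
    if PySem.Str.isIn "windows" s then
      if PySem.Str.isIn "2019" s then "windows-2019"
      else if PySem.Str.isIn "2022" s then "windows-2022"
      else if PySem.Str.isIn "2025" s then "windows-2025"
      else "windows"
    else if PySem.Str.isIn "ubuntu" s then
      if PySem.Str.isIn "22.04" s || PySem.Str.isIn "22-04" s || PySem.Str.isIn "jammy" s then "ubuntu-22-04"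
      else if PySem.Str.isIn "24.04" s || PySem.Str.isIn "24-04" s || PySem.Str.isIn "noble" s then "ubuntu-24-04"
      else "ubuntu-22-04"
    else if PySem.Str.isIn "debian" s then
      if PySem.Str.isIn "11" s || PySem.Str.isIn "bullseye" s then "debian-11"
      else "debian-11"
    else if PySem.Str.isIn "centos" s then
      if PySem.Str.isIn "7" s then "centos-7"
      else "linux"
    else if PySem.Str.isIn "alma" s || PySem.Str.isIn "almalinux" s then
      if PySem.Str.isIn "9" s then "almalinux-9"
      else "linux"
    else if PySem.Str.isIn "oracle" s then
      if PySem.Str.isIn "9" s then "oracle-linux-9"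
      else "linux"
    else if ["rocky", "rhel", "red hat", "fedora"].any (fun k => PySem.Str.isIn k s) then "linux"
    else if PySem.Str.isIn "linux" s then "linux"
    else "linux"

-- ===== PORT B =====
-- the ordered rule table of Source B
def platformRules : List (String × List (List String × String) × String) :=
  [ ("windows", [(["2019"], "windows-2019"),
                 (["2022"], "windows-2022"),
                 (["2025"], "windows-2025")], "windows"),
    ("ubuntu",  [(["22.04", "22-04", "jammy"], "ubuntu-22-04"),
                 (["24.04", "24-04", "noble"], "ubuntu-24-04")], "ubuntu-22-04"),
    ("debian",  [], "debian-11"),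
    ("centos",  [(["7"], "centos-7")], "linux"),
    ("alma",    [(["9"], "almalinux-9")], "linux"),
    ("oracle",  [(["9"], "oracle-linux-9")], "linux") ]

-- inner loop of Source B: first subrule whose substrings match, else the family default
def platformSubSlug (s : String) (dflt : String) : List (List String × String) → String
  | [] => dflt
  | (substrings, slug) :: rest =>
      if substrings.any (fun k => PySem.Str.isIn k s) then slug
      else platformSubSlug s dflt rest

-- outer loop of Source B: first family whose keyword occurs in s
def platformGo (s : String) : List (String × List (List String × String) × String) → String
  | [] => "linux"
  | (family, subrules, familyDefault) :: rest =>
      if PySem.Str.isIn family s then platformSubSlug s familyDefault subrules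
      else platformGo s rest

def detect_platform_slug_alt (os_name : String) : String :=
  platformGo (PySem.Str.lower os_name) platformRules

-- ===== PRECONDITION & SPEC =====
def Spec_detect_platform_slug (os_name : String) (out : String) : Prop := out = detect_platform_slug_alt os_name
instance (os_name : String) (out : String) : Decidable (Spec_detect_platform_slug os_name out) := by unfold Spec_detect_platform_slug; infer_instance

-- ===== CLAIM (what is proved, stated in full; the proofs are below) =====
def Claim_equal_detect_platform_slug : Prop := ∀ (os_name : String), Dom_detect_platform_slug os_name → Spec_detect_platform_slug os_name (detect_platform_slug os_name)

-- ===== LEMMAS AND PROOFS =====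

-- "almalinux" in s forces "alma" in s (substring transitivity), so A's extra disjunct is redundant
theorem isIn_alma_of_isIn_almalinux (s : String) (h : PySem.Str.isIn "almalinux" s = true) :
    PySem.Str.isIn "alma" s = true := by
  have h' := (PySem.Chars.isIn_iff_infix (sub := "almalinux".toList) (s := s.toList)).mp (by
    simpa [PySem.Str.isIn] using h)
  have hsub : "alma".toList <:+: "almalinux".toList := by decide
  have : "alma".toList <:+: s.toList := hsub.trans h'
  simpa [PySem.Str.isIn, PySem.Chars.isIn_iff_infix] using this

theorem alma_or (s : String) :
    (PySem.Str.isIn "alma" s || PySem.Str.isIn "almalinux" s) = PySem.Str.isIn "alma" s := by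
  cases halmal : PySem.Str.isIn "almalinux" s
  · simp
  · rw [isIn_alma_of_isIn_almalinux s halmal]; decide

-- ===== VERDICT (by name: the statement is the Claim_ definition above) =====
theorem detect_platform_slug_spec : Claim_equal_detect_platform_slug := by
  intro os_name _
  show detect_platform_slug os_name = detect_platform_slug_alt os_name
  by_cases he : os_name = ""
  · subst he; rfl
  · simp only [detect_platform_slug, detect_platform_slug_alt, platformRules, platformGo,
      platformSubSlug, List.any_cons, List.any_nil, beq_iff_eq, he, if_false, alma_or,
      Bool.or_false, Bool.or_assoc, ite_self]
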